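-- pv_equiv track=rewrite | github.com/def3/inferact | nfr_basic.py | compress_list
-- ===== SOURCE A (Python) =====
-- def unsubList(lst): # OK
--     l = set(lst)
--     #l = sorted(list(set(lst)),reverse=True)
--     #l = list(l)
--     ret = list()
--     for s in l:
--         not_sub=True
--         for e in l:
--             if e.startswith(s+':'):
--                 not_sub=False
--                 continue # append
--         if not_sub:
--             ret.append(s)
--     #print 'R:',ret
--     return ret
--
-- def compress_list(alist): # <-- a:b:c a:b:x a:b
--     """Compress a list of colon-separated strings into a more compact
--     representation.
--     """
--     #print '1>',alist
--     alist = unsubList(alist)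
--     #print '2>',alist
--     #print alist
--     # removing sub duplicates
--     #print any([l.startswith(l[0]) and alist.count(l) >= 1 for l in alist])
--     #alist = [ t for t in alist if not any([l.startswith(t) and alist.count(t) > 1 for l in alist]) ]
--     #print alist,'\n\n'
--     components = [ss.split(':') for ss in alist]
--
--     # Check that every string in the supplied list has the same number of tags
--     tag_counts = [len(cc) for cc in components]
--     if len(set(tag_counts)) != 1:
--         raise ValueError("Not all of the strings have the same number of tags")
--
--     # For each component, gather a list of all the applicable tags. The set
--     # at index k of tag_possibilities is all the possibilities for the
--     # kth tag
--     tag_possibilities = list()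
--     for tag_idx in range(tag_counts[0]):
--         tag_possibilities.append(set(cc[tag_idx] for cc in components))
--
--     #print '3>',tag_possibilities
--
--     # Now take the list of tags, and turn them into slash-separated strings
--     tag_possibilities_strs = ['/'.join(sorted(tt)) for tt in tag_possibilities]
--
--     # Finally, stitch this together with colons
--     return ':'.join(tag_possibilities_strs)
-- ===== SOURCE B (Python) =====
-- def compress_list(alist):
--     """Compress a list of colon-separated strings into a more compact
--     representation.
--     """
--     uniq = set(alist)
--     # Index every strict token-prefix of every string once, instead of the
--     # all-pairs startswith scan: s survives iff s is not such a prefix.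
--     prefixes = set()
--     for s in uniq:
--         toks = s.split(':')
--         for i in range(1, len(toks)):
--             prefixes.add(':'.join(toks[:i]))
--     components = [s.split(':') for s in uniq if s not in prefixes]
--
--     lens = set(len(cc) for cc in components)
--     if len(lens) != 1:
--         raise ValueError("Not all of the strings have the same number of tags")
--     n = lens.pop()
--
--     # One pass over the survivors fills every tag column.
--     columns = [set() for _ in range(n)]
--     for cc in components:
--         for k, tag in enumerate(cc):
--             columns[k].add(tag)
--
--     return ':'.join('/'.join(sorted(col)) for col in columns)
-- ===== Notes on version B (the rewrite author's own statement) =====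
-- stated objective: faster
-- what changed: A's quadratic all-pairs startswith scan for colon-prefix subsumption is replaced by a hash set of every strict colon-token prefix built in one pass (a string survives iff it is not in that set), and the per-position tag sets are filled in a single pass over the survivors instead of one scan per tag position.
import Mathlib
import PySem

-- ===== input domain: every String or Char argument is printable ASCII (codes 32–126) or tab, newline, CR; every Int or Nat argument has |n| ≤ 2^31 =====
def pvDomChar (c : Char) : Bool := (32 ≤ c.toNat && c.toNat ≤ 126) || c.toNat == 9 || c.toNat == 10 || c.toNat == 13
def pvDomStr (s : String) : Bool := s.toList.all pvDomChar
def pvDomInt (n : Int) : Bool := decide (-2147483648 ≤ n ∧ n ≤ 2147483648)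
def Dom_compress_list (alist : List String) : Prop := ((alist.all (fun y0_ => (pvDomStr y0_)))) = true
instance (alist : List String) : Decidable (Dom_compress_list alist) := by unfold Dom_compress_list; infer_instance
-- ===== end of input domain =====

-- B replaces A's all-pairs startswith scan by a set of all strict colon-token
-- prefixes built in one pass, and fills all tag columns in a single pass over the
-- survivors (objective: faster subsumption step).

-- ===== PORT A =====
def unsubListPort (lst : List String) : List String :=
  let l : PySem.Set String := PySem.Set.ofList lst
  l.foldl (fun ret s =>
    let not_sub := l.foldl (fun ns e =>
      if PySem.Str.startswith e (s ++ ":") then false else ns) true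
    if not_sub then ret ++ [s] else ret) []

def compress_list (alist : List String) : String :=
  let alist2 := unsubListPort alist
  let components := alist2.map (fun ss => (PySem.Str.split? ss ":").getD [])
  let tag_counts : List Int := components.map (fun cc => (cc.length : Int))
  if (PySem.Set.ofList tag_counts).length ≠ 1 then ""
  else
    let tag_possibilities := (PySem.List.pyRange 0 (PySem.List.pyGetD tag_counts 0 0) 1).map
      (fun tag_idx => PySem.Set.ofList (components.map (fun cc => PySem.List.pyGetD cc tag_idx "")))
    let tps := tag_possibilities.map (fun tt => PySem.Str.join "/" (PySem.List.sorted tt (fun x => x)))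
    PySem.Str.join ":" tps

-- ===== PORT B =====
def compress_list_alt (alist : List String) : String :=
  let uniq : PySem.Set String := PySem.Set.ofList alist
  let prefixes : PySem.Set String := uniq.foldl (fun pr s =>
      let toks := (PySem.Str.split? s ":").getD []
      (PySem.List.pyRange 1 (toks.length : Int) 1).foldl
        (fun pr i => PySem.Set.add pr (PySem.Str.join ":" (PySem.List.slice toks none (some i)))) pr)
    PySem.Set.empty
  let components := (uniq.filter (fun s => !(PySem.Set.contains prefixes s))).map
    (fun s => (PySem.Str.split? s ":").getD [])
  let lens : PySem.Set Int := PySem.Set.ofList (components.map (fun cc => (cc.length : Int)))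
  if lens.length ≠ 1 then ""
  else
    let n := PySem.List.pyGetD lens 0 0
    let columns0 : List (PySem.Set String) := (PySem.List.pyRange 0 n 1).map (fun _ => PySem.Set.empty)
    let columns := components.foldl (fun cols cc =>
      List.zipWith (fun col tag => PySem.Set.add col tag) cols cc) columns0
    PySem.Str.join ":" (columns.map (fun col =>
      PySem.Str.join "/" (PySem.List.sorted col (fun x => x))))

-- ===== PRECONDITION & SPEC =====
-- Pre_ excludes exactly the inputs on which A raises (ValueError: the empty list,
-- and lists whose non-subsumed strings do not all have the same number of tags);
-- B raises the same ValueError there.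
def Pre_compress_list (alist : List String) : Prop :=
  alist ≠ [] ∧ ∀ s ∈ alist, (∀ e ∈ alist, PySem.Str.startswith e (s ++ ":") = false) →
    ∀ t ∈ alist, (∀ e ∈ alist, PySem.Str.startswith e (t ++ ":") = false) →
      ((PySem.Str.split? s ":").getD []).length = ((PySem.Str.split? t ":").getD []).length
instance (alist : List String) : Decidable (Pre_compress_list alist) := by
  unfold Pre_compress_list; infer_instance

def pvWitness_compress_list : List String := ["a:b:c", "a:b:x", "a:b"]

def Spec_compress_list (alist : List String) (out : String) : Prop := out = compress_list_alt alist
instance (alist : List String) (out : String) : Decidable (Spec_compress_list alist out) := by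
  unfold Spec_compress_list; infer_instance

-- ===== CLAIM (what is proved, stated in full; the proofs are below) =====
def Claim_equal_compress_list : Prop := ∀ (alist : List String), Dom_compress_list alist → Pre_compress_list alist → Spec_compress_list alist (compress_list alist)

-- ===== LEMMAS AND PROOFS =====

def splitc (c : Char) : List Char → List (List Char)
  | [] => [[]]
  | x :: xs =>
    if x = c then [] :: splitc c xs
    else
      match splitc c xs with
      | t :: ts => (x :: t) :: ts
      | [] => [[x]]

theorem splitc_ne_nil (c : Char) (cs : List Char) : splitc c cs ≠ [] := by
  cases cs with
  | nil => simp [splitc]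
  | cons x xs =>
    simp only [splitc]
    split_ifs with h
    · simp
    · split <;> simp

theorem modifyHead_id' {α : Type} (l : List α) : List.modifyHead (fun x => x) l = l := by
  cases l <;> simp

theorem splitOn_go_eq (c : Char) (cs : List Char) : ∀ (fuel : Nat) (cur : List Char)
    (acc : List (List Char)), cs.length ≤ fuel →
    PySem.Chars.splitOn.go [c] fuel cs cur acc
      = acc.reverse ++ (splitc c cs).modifyHead (cur.reverse ++ ·) := by
  induction cs with
  | nil =>
    intro fuel cur acc _
    cases fuel <;> simp [PySem.Chars.splitOn.go, splitc]
  | cons x xs ih =>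
    intro fuel cur acc hf
    cases fuel with
    | zero => simp at hf
    | succ f =>
      simp only [List.length_cons, Nat.succ_le_succ_iff] at hf
      by_cases hx : x = c
      · subst hx
        rw [show PySem.Chars.splitOn.go [x] (f+1) (x :: xs) cur acc
              = PySem.Chars.splitOn.go [x] f xs [] (cur.reverse :: acc) by
            simp [PySem.Chars.splitOn.go, List.isPrefixOf]]
        rw [ih f [] (cur.reverse :: acc) hf]
        simp [splitc, modifyHead_id']
      · rw [show PySem.Chars.splitOn.go [c] (f+1) (x :: xs) cur acc
              = PySem.Chars.splitOn.go [c] f xs (x :: cur) acc by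
            simp [PySem.Chars.splitOn.go, List.isPrefixOf, Ne.symm hx]]
        rw [ih f (x :: cur) acc hf]
        simp only [splitc, if_neg hx]
        rcases hs : splitc c xs with _ | ⟨t, ts⟩
        · exact absurd hs (splitc_ne_nil c xs)
        · simp

theorem splitOn_eq_splitc (c : Char) (cs : List Char) :
    PySem.Chars.splitOn cs [c] = splitc c cs := by
  rw [PySem.Chars.splitOn, splitOn_go_eq c cs (cs.length + 1) [] [] (by omega)]
  simp [modifyHead_id']

theorem intercalate_cc (c : Char) (p q : List Char) (r : List (List Char)) :
    List.intercalate [c] (p :: q :: r) = p ++ c :: List.intercalate [c] (q :: r) := by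
  simp [List.intercalate, List.intersperse]

theorem intercalate_one (c : Char) (p : List Char) : List.intercalate [c] [p] = p := by
  simp [List.intercalate]

theorem intercalate_splitc (c : Char) (cs : List Char) :
    List.intercalate [c] (splitc c cs) = cs := by
  induction cs with
  | nil => simp [splitc, List.intercalate]
  | cons x xs ih =>
    simp only [splitc]
    split_ifs with h
    · subst h
      rcases hs : splitc x xs with _ | ⟨t, ts⟩
      · exact absurd hs (splitc_ne_nil x xs)
      · rw [hs] at ih; rw [intercalate_cc]; simpa using ih
    · rcases hs : splitc c xs with _ | ⟨t, ts⟩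
      · exact absurd hs (splitc_ne_nil c xs)
      · rw [hs] at ih
        cases ts with
        | nil =>
          rw [intercalate_one] at ih
          simpa [intercalate_one] using congrArg (x :: ·) ih
        | cons u us =>
          rw [intercalate_cc] at ih
          rw [intercalate_cc]
          simpa using congrArg (x :: ·) ih

theorem splitc_append (c : Char) (a b : List Char) :
    splitc c (a ++ c :: b) = splitc c a ++ splitc c b := by
  induction a with
  | nil => simp [splitc]
  | cons x xs ih =>
    simp only [List.cons_append, splitc, ih]
    split_ifs with h
    · rfl
    · rcases hs : splitc c xs with _ | ⟨t, ts⟩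
      · exact absurd hs (splitc_ne_nil c xs)
      · simp

theorem intercalate_take_drop (c : Char) (l : List (List Char)) (i : Nat)
    (h1 : 0 < i) (h2 : i < l.length) :
    List.intercalate [c] l
      = List.intercalate [c] (l.take i) ++ c :: List.intercalate [c] (l.drop i) := by
  induction l generalizing i with
  | nil => simp at h2
  | cons t ts ih =>
    cases ts with
    | nil => simp at h2; omega
    | cons u us =>
      cases i with
      | zero => omega
      | succ j =>
        cases j with
        | zero => simp [intercalate_cc, intercalate_one]
        | succ k =>
          have h2' : k + 1 < (u :: us).length := by simpa using h2
          have hih := ih (k+1) (by omega) h2'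
          rcases hu : (u :: us).take (k+1) with _ | ⟨v, vs⟩
          · simp at hu
          · rw [List.take_succ_cons, hu, List.drop_succ_cons]
            rw [intercalate_cc, intercalate_cc]
            rw [hu] at hih
            rw [List.drop_succ_cons] at hih
            simp [hih]

theorem prefix_iff_take (c : Char) (p e : List Char) :
    (p ++ [c]) <+: e ↔
      ∃ i : Nat, 1 ≤ i ∧ i < (splitc c e).length ∧
        p = List.intercalate [c] ((splitc c e).take i) := by
  constructor
  · rintro ⟨r, hr⟩
    have he : e = p ++ c :: r := by simpa using hr.symm
    subst he
    refine ⟨(splitc c p).length, ?_, ?_, ?_⟩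
    · have := splitc_ne_nil c p
      cases hs : splitc c p with
      | nil => exact absurd hs this
      | cons a as => simp
    · rw [splitc_append]
      have := splitc_ne_nil c r
      cases hs : splitc c r with
      | nil => exact absurd hs this
      | cons a as => simp
    · rw [splitc_append, List.take_left]
      exact (intercalate_splitc c p).symm
  · rintro ⟨i, h1, h2, hp⟩
    have he : e = List.intercalate [c] ((splitc c e).take i)
        ++ c :: List.intercalate [c] ((splitc c e).drop i) := by
      conv_lhs => rw [← intercalate_splitc c e]
      exact intercalate_take_drop c _ i h1 h2
    rw [← hp] at he
    refine ⟨List.intercalate [c] ((splitc c e).drop i), ?_⟩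
    conv_rhs => rw [he]
    simp

theorem split?_eq (e : String) :
    PySem.Str.split? e ":" = some ((splitc ':' e.toList).map String.ofList) := by
  simp [PySem.Str.split?, PySem.Chars.split?, splitOn_eq_splitc]

theorem join_ofList (l : List (List Char)) :
    PySem.Str.join ":" (l.map String.ofList) = String.ofList (List.intercalate [':'] l) := by
  simp only [PySem.Str.join, List.map_map]
  have h : l.map (String.toList ∘ String.ofList) = l := by
    apply (List.map_congr_left ?_).trans (List.map_id _)
    intro a _; simp
  rw [h]
  rfl

theorem startswith_iff_mem_range (s e : String) :
    PySem.Str.startswith e (s ++ ":") = true ↔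
      ∃ i ∈ PySem.List.pyRange 1 ((((PySem.Str.split? e ":").getD []).length : Int)) 1,
        s = PySem.Str.join ":"
          (PySem.List.slice ((PySem.Str.split? e ":").getD []) none (some i)) := by
  rw [split?_eq]
  simp only [Option.getD_some, List.length_map]
  rw [PySem.Str.startswith_eq, PySem.Chars.startswith_iff]
  have htl : (s ++ ":").toList = s.toList ++ [':'] := by simp
  rw [htl, prefix_iff_take ':' s.toList e.toList]
  constructor
  · rintro ⟨i, h1, h2, hp⟩
    refine ⟨(i : Int), ?_, ?_⟩
    · rw [PySem.List.mem_pyRange_one]; constructor <;> [exact_mod_cast h1; exact_mod_cast h2]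
    · rw [PySem.List.slice_to _ (by positivity)]
      have hti : ((i : Int).toNat) = i := by simp
      rw [hti, ← List.map_take, join_ofList]
      rw [← hp]
      exact String.ofList_toList.symm
  · rintro ⟨i, hi, hp⟩
    rw [PySem.List.mem_pyRange_one] at hi
    obtain ⟨hi1, hi2⟩ := hi
    refine ⟨i.toNat, by omega, by omega, ?_⟩
    rw [PySem.List.slice_to _ (by omega), ← List.map_take, join_ofList] at hp
    rw [hp, String.toList_ofList]

theorem inner_foldl_eq (s : String) (l : List String) (b : Bool) :
    l.foldl (fun ns e => if PySem.Str.startswith e (s ++ ":") then false else ns) b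
      = (b && !(l.any (fun e => PySem.Str.startswith e (s ++ ":")))) := by
  induction l generalizing b with
  | nil => simp
  | cons e es ih =>
    rw [List.foldl_cons, ih]
    cases h : PySem.Str.startswith e (s ++ ":") <;> simp at h <;> simp [h]

theorem unsubListPort_eq_filter (lst : List String) :
    unsubListPort lst = (PySem.Set.ofList lst).filter
      (fun s => !((PySem.Set.ofList lst).any (fun e => PySem.Str.startswith e (s ++ ":")))) := by
  show (PySem.Set.ofList lst).foldl _ [] = _
  have hfun : (fun (ret : List String) (s : String) =>
      let not_sub := (PySem.Set.ofList lst).foldl (fun ns e =>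
        if PySem.Str.startswith e (s ++ ":") then false else ns) true
      if not_sub then ret ++ [s] else ret)
      = (fun (ret : List String) (s : String) =>
        if (fun s => !((PySem.Set.ofList lst).any
            (fun e => PySem.Str.startswith e (s ++ ":")))) s then ret ++ [(fun s => s) s] else ret) := by
    funext ret s
    rw [show (let not_sub := (PySem.Set.ofList lst).foldl (fun ns e =>
        if PySem.Str.startswith e (s ++ ":") then false else ns) true
      if not_sub then ret ++ [s] else ret)
        = if (PySem.Set.ofList lst).foldl (fun ns e =>
            if PySem.Str.startswith e (s ++ ":") then false else ns) true then ret ++ [s] else ret from rfl]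
    rw [inner_foldl_eq]
    simp
  rw [hfun, PySem.List.foldl_append_if]
  simp

theorem mem_prefixFold (U : List String) (pr : PySem.Set String) (x : String) :
    x ∈ U.foldl (fun pr s =>
        let toks := (PySem.Str.split? s ":").getD []
        (PySem.List.pyRange 1 (toks.length : Int) 1).foldl
          (fun pr i => PySem.Set.add pr
            (PySem.Str.join ":" (PySem.List.slice toks none (some i)))) pr) pr
      ↔ x ∈ pr ∨ ∃ e ∈ U, ∃ i ∈ PySem.List.pyRange 1 ((((PySem.Str.split? e ":").getD []).length : Int)) 1,
          x = PySem.Str.join ":"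
            (PySem.List.slice ((PySem.Str.split? e ":").getD []) none (some i)) := by
  induction U generalizing pr with
  | nil => simp
  | cons e es ih =>
    simp only [List.foldl_cons]
    rw [ih]
    rw [PySem.Set.mem_foldl_add]
    simp only [List.mem_cons]
    constructor
    · rintro (⟨h | ⟨i, hi, hx⟩⟩ | ⟨f, hf, hex⟩)
      · exact Or.inl h
      · exact Or.inr ⟨e, Or.inl rfl, i, hi, hx⟩
      · exact Or.inr ⟨f, Or.inr hf, hex⟩
    · rintro (h | ⟨f, (rfl | hf), hex⟩)
      · exact Or.inl (Or.inl h)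
      · exact Or.inl (Or.inr hex)
      · exact Or.inr ⟨f, hf, hex⟩

theorem cols_foldl_eq (N : Nat) (comps : List (List String))
    (h : ∀ cc ∈ comps, cc.length = N) (cols0 : List (PySem.Set String))
    (h0 : cols0.length = N) :
    comps.foldl (fun cols cc =>
        List.zipWith (fun col tag => PySem.Set.add col tag) cols cc) cols0
      = (List.range N).map (fun k =>
          comps.foldl (fun col cc => PySem.Set.add col (cc.getD k "")) (cols0.getD k [])) := by
  induction comps generalizing cols0 with
  | nil =>
    simp only [List.foldl_nil]
    apply List.ext_getElem (by simp [h0])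
    intro k h1 h2
    simp only [List.getElem_map, List.getElem_range]
    rw [List.getD_eq_getElem cols0 [] (by omega)]
  | cons cc comps ih =>
    simp only [List.foldl_cons]
    have hcc : cc.length = N := h cc (by simp)
    have hz : (List.zipWith (fun col tag => PySem.Set.add col tag) cols0 cc).length = N := by
      simp [h0, hcc]
    rw [ih (fun c hc => h c (by simp [hc])) _ hz]
    apply List.map_congr_left
    intro k hk
    rw [List.mem_range] at hk
    have e1 : (List.zipWith (fun col tag => PySem.Set.add col tag) cols0 cc).getD k []
        = PySem.Set.add (cols0.getD k []) (cc.getD k "") := by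
      rw [List.getD_eq_getElem _ [] (by omega), List.getD_eq_getElem cols0 [] (by omega),
        List.getD_eq_getElem cc "" (by omega), List.getElem_zipWith]
    rw [e1]

theorem pyGetD_zero {α : Type} (x : α) (xs : List α) (d : α) :
    PySem.List.pyGetD (x :: xs) 0 d = x := by
  have h := PySem.List.pyGetD_natCast (x :: xs) 0 d
  simp only [Nat.cast_zero] at h
  rw [h]
  rfl

theorem components_eq (alist : List String) :
    (PySem.Set.ofList alist).filter (fun s =>
        !(PySem.Set.contains ((PySem.Set.ofList alist).foldl (fun pr s =>
            let toks := (PySem.Str.split? s ":").getD []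
            (PySem.List.pyRange 1 (toks.length : Int) 1).foldl
              (fun pr i => PySem.Set.add pr
                (PySem.Str.join ":" (PySem.List.slice toks none (some i)))) pr)
          PySem.Set.empty) s))
    = unsubListPort alist := by
  rw [unsubListPort_eq_filter]
  apply List.filter_congr
  intro s hs
  congr 1
  rw [Bool.eq_iff_iff, PySem.Set.contains_iff, mem_prefixFold, List.any_eq_true]
  constructor
  · rintro (h | ⟨e, he, hex⟩)
    · simp [PySem.Set.empty] at h
    · exact ⟨e, he, (startswith_iff_mem_range s e).mpr hex⟩
  · rintro ⟨e, he, hst⟩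
    exact Or.inr ⟨e, he, (startswith_iff_mem_range s e).mp hst⟩

theorem tail_eq (comps : List (List String)) :
    (if (PySem.Set.ofList (comps.map (fun cc => (cc.length : Int)))).length ≠ 1 then ""
     else
      let tag_possibilities := (PySem.List.pyRange 0
          (PySem.List.pyGetD (comps.map (fun cc => (cc.length : Int))) 0 0) 1).map
        (fun tag_idx => PySem.Set.ofList (comps.map (fun cc => PySem.List.pyGetD cc tag_idx "")))
      let tps := tag_possibilities.map (fun tt => PySem.Str.join "/" (PySem.List.sorted tt (fun x => x)))
      PySem.Str.join ":" tps)
    = (if (PySem.Set.ofList (comps.map (fun cc => (cc.length : Int)))).length ≠ 1 then ""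
       else
        let n := PySem.List.pyGetD (PySem.Set.ofList (comps.map (fun cc => (cc.length : Int)))) 0 0
        let columns0 : List (PySem.Set String) := (PySem.List.pyRange 0 n 1).map (fun _ => PySem.Set.empty)
        let columns := comps.foldl (fun cols cc =>
          List.zipWith (fun col tag => PySem.Set.add col tag) cols cc) columns0
        PySem.Str.join ":" (columns.map (fun col =>
          PySem.Str.join "/" (PySem.List.sorted col (fun x => x))))) := by
  by_cases hc : (PySem.Set.ofList (comps.map (fun cc => (cc.length : Int)))).length = 1
  · rw [if_neg (by omega), if_neg (by omega)]
    -- the length-1 set is a singleton [m]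
    rcases hL : PySem.Set.ofList (comps.map (fun cc => (cc.length : Int))) with _ | ⟨m, rest⟩
    · rw [hL] at hc; simp at hc
    · have hrest : rest = [] := by
        rw [hL] at hc; simpa using hc
      subst hrest
      -- every length equals m
      have hall : ∀ cc ∈ comps, (cc.length : Int) = m := by
        intro cc hcc
        have : (cc.length : Int) ∈ PySem.Set.ofList (comps.map (fun cc => (cc.length : Int))) := by
          rw [PySem.Set.mem_ofList]; exact List.mem_map_of_mem hcc
        rw [hL] at this; simpa using this
      -- comps is nonempty
      rcases comps with _ | ⟨cc0, comps'⟩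
      · rw [PySem.Set.ofList] at hL; simp [PySem.Set.empty] at hL
      · have hm : m = (cc0.length : Int) := (hall cc0 (by simp)).symm
        set N := cc0.length with hN
        have hallN : ∀ cc ∈ cc0 :: comps', cc.length = N := by
          intro cc hcc
          have := hall cc hcc
          rw [hm] at this
          exact_mod_cast this
        -- both index expressions are ↑N
        have hA : PySem.List.pyGetD ((cc0 :: comps').map (fun cc => (cc.length : Int))) 0 0 = (N : Int) := by
          simp only [List.map_cons]
          rw [pyGetD_zero]
        have hB : PySem.List.pyGetD (PySem.Set.ofList ((cc0 :: comps').map (fun cc => (cc.length : Int)))) 0 0 = (N : Int) := by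
          rw [hL, pyGetD_zero, hm]
        rw [hA, hB]
        simp only []
        rw [PySem.List.pyRange_zero_natCast]
        -- B's initial columns
        have hlen0 : (((List.range N).map (fun k => ((k : Nat) : Int))).map (fun _ => (PySem.Set.empty : PySem.Set String))).length = N := by simp
        rw [cols_foldl_eq N (cc0 :: comps') hallN _ hlen0]
        rw [List.map_map, List.map_map, List.map_map]
        congr 1
        apply List.map_congr_left
        intro k hk
        rw [List.mem_range] at hk
        simp only [Function.comp_apply]
        have hgd : (((List.range N).map (fun k => ((k : Nat) : Int))).map (fun _ => (PySem.Set.empty : PySem.Set String))).getD k [] = PySem.Set.empty := by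
          rw [List.getD_eq_getElem _ [] (by simp; omega)]
          simp
        simp only [hgd]
        congr 2
        rw [PySem.Set.ofList_eq_foldl, List.foldl_map]
        congr 1
        funext col cc
        rw [PySem.List.pyGetD_natCast]
  · rw [if_pos (by omega), if_pos (by omega)]

theorem main_eq (alist : List String) : compress_list alist = compress_list_alt alist := by
  show (let alist2 := unsubListPort alist; _) = _
  unfold compress_list compress_list_alt
  simp only []
  rw [components_eq alist]
  exact tail_eq ((unsubListPort alist).map (fun ss => (PySem.Str.split? ss ":").getD []))

-- ===== VERDICT (by name: the statement is the Claim_ definition above) =====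
theorem compress_list_spec : Claim_equal_compress_list := by
  intro alist _ _
  unfold Spec_compress_list
  exact main_eq alist
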